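-- pv_equiv track=rewrite | github.com/BiprofessionalPrasad/Python | SparseBinaryDecomposition.py | solution
-- ===== SOURCE A (Python) =====
-- def is_sparse(n: int) -> bool:
--     return (n & (n >> 1)) == 0
--
-- def solution(N: int) -> int:
--
--     if is_sparse(N):
--         return N
--     P = 0
--     for i in range(29, -1, -1):
--         n_bit_is_set = (N >> i) & 1
--         if n_bit_is_set:
--             p_next_bit_is_set = (i < 29) and ((P >> (i + 1)) & 1)
--             if not p_next_bit_is_set:
--                 P |= (1 << i)
--     return P
-- ===== SOURCE B (Python) =====
-- def is_sparse(n: int) -> bool: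
--     return (n & (n >> 1)) == 0
--
-- def solution(N: int) -> int:
--     if is_sparse(N):
--         return N
--     # Pass 1: maximal runs of consecutive set bits in the 30-bit window, as (top, length)
--     runs = []
--     i = 29
--     while i >= 0:
--         if (N >> i) & 1:
--             top = i
--             while i >= 0 and (N >> i) & 1:
--                 i -= 1
--             runs.append((top, top - i))
--         else:
--             i -= 1
--     # Pass 2: keep every other bit from each run's most-significant end
--     P = 0
--     for top, length in runs:
--         for k in range(0, length, 2):
--             P |= 1 << (top - k)
--     return P
-- ===== Notes on version B (the rewrite author's own statement) =====
-- stated objective: alternative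
-- what changed: A's single top-down loop that re-reads the result's bit above each position is replaced by a two-pass run decomposition: first collect the maximal runs of consecutive set bits in the 30-bit window as (top, length) pairs, then build P by OR-ing in every other bit from each run's most-significant end.
import Mathlib
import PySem

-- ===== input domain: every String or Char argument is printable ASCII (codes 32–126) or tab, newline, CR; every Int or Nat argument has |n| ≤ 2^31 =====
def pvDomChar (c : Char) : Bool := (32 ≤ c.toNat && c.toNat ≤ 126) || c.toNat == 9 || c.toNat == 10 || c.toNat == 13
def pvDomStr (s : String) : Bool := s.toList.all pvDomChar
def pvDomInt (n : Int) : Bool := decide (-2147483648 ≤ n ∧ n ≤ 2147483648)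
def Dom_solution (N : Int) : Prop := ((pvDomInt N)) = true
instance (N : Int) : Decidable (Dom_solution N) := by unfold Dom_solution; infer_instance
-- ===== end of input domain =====

-- B replaces A's top-down loop that re-reads P's bit above each position by a two-pass run
-- decomposition (collect maximal runs of set bits, then OR in every other bit from each run's
-- top); same return value on every input (alternative; return value only, no mutation involved).

-- ===== PORT A =====
-- is_sparse(n): (n & (n >> 1)) == 0  (shared helper of both Python files)
def is_sparse (n : Int) : Bool := PySem.Int.band n (n >>> (1:Nat)) == 0

-- body of A's `for i in range(29, -1, -1)` loop; shift amounts are i.toNat (exact: i ≥ 0 on every iteration)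
def solutionStep (N : Int) (P : Int) (i : Int) : Int :=
  let nBitIsSet := PySem.Int.band (N >>> i.toNat) 1
  if nBitIsSet ≠ 0 then
    let pNextBitIsSet := decide (i < 29) && !(PySem.Int.band (P >>> (i + 1).toNat) 1 == 0)
    if !pNextBitIsSet then PySem.Int.bor P ((1:Int) <<< i.toNat) else P
  else P

def solution (N : Int) : Int :=
  if is_sparse N then N
  else (PySem.List.pyRange 29 (-1) (-1)).foldl (solutionStep N) 0

-- ===== PORT B =====
-- Source B's inner `while i >= 0 and (N >> i) & 1: i -= 1`, as recursion on i
def runBottom (N : Int) (i : Int) : Int :=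
  if 0 ≤ i ∧ PySem.Int.band (N >>> i.toNat) 1 ≠ 0 then runBottom N (i - 1) else i
termination_by (i + 1).toNat
decreasing_by omega

-- termination helper for findRuns (the outer while loop strictly decreases i)
theorem runBottom_le (N : Int) (i : Int) : runBottom N i ≤ i := by
  induction i using runBottom.induct (N := N) with
  | case1 i h ih => rw [runBottom, if_pos h]; omega
  | case2 i h => rw [runBottom, if_neg h]

-- Source B's outer `while i >= 0` loop collecting the runs as (top, length)
def findRuns (N : Int) (i : Int) (acc : List (Int × Int)) : List (Int × Int) :=
  if h0 : 0 ≤ i then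
    if PySem.Int.band (N >>> i.toNat) 1 ≠ 0 then
      findRuns N (runBottom N i) (acc ++ [(i, i - runBottom N i)])
    else findRuns N (i - 1) acc
  else acc
termination_by (i + 1).toNat
decreasing_by
  · have h1 : runBottom N i = runBottom N (i - 1) := by
      rw [runBottom]; simp only [if_pos (⟨h0, by assumption⟩ : 0 ≤ i ∧ _)]
    have h2 := runBottom_le N (i - 1)
    omega
  · omega

-- Source B's pass 2 body: `for k in range(0, length, 2): P |= 1 << (top - k)`
def runOr (P : Int) (r : Int × Int) : Int :=
  (PySem.List.pyRange 0 r.2 2).foldl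
    (fun P k => PySem.Int.bor P ((1:Int) <<< (r.1 - k).toNat)) P

def solution_alt (N : Int) : Int :=
  if is_sparse N then N
  else (findRuns N 29 []).foldl runOr 0

-- ===== PRECONDITION & SPEC =====
def Spec_solution (N : Int) (out : Int) : Prop := out = solution_alt N
instance (N : Int) (out : Int) : Decidable (Spec_solution N out) := by unfold Spec_solution; infer_instance

-- ===== CLAIM (what is proved, stated in full; the proofs are below) =====
def Claim_equal_solution : Prop := ∀ (N : Int), Dom_solution N → Spec_solution N (solution N)

-- ===== LEMMAS AND PROOFS =====

-- bit j of the result window is kept iff bit j of N is set and bit j+1 was not kept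

def keptB (N : Int) (j : Nat) : Bool :=
  if 30 ≤ j then false
  else (!(PySem.Int.band (N >>> j) 1 == 0)) && !(keptB N (j + 1))
termination_by 30 - j

-- the number whose binary digits are exactly the kept bits at positions ≥ j
def Msum (N : Int) (j : Nat) : Nat :=
  if 30 ≤ j then 0
  else (if keptB N j then 2 ^ j else 0) + Msum N (j + 1)
termination_by 30 - j

theorem lorPowAdd (m k : Nat) (h : 2^(k+1) ∣ m) : m ||| 2^k = m + 2^k := by
  apply Nat.eq_of_testBit_eq
  intro j
  obtain ⟨t, rfl⟩ := h
  rw [Nat.testBit_lor]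
  rcases lt_trichotomy j k with hj | hj | hj
  · have e1 : 2^(k+1)*t = 2^j * (2^(k+1-j)*t) := by rw [← Nat.mul_assoc, ← pow_add]; congr 2; omega
    have e2 : (2:Nat)^k = 2^j * 2^(k-j) := by rw [← pow_add]; congr 1; omega
    rw [Nat.testBit_eq_decide_div_mod_eq, Nat.testBit_eq_decide_div_mod_eq, Nat.testBit_eq_decide_div_mod_eq,
        e1, e2, ← Nat.mul_add, Nat.mul_div_cancel_left _ (Nat.pow_pos (by norm_num) (n := j)),
        Nat.mul_div_cancel_left _ (Nat.pow_pos (by norm_num) (n := j)),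
        Nat.mul_div_cancel_left _ (Nat.pow_pos (by norm_num) (n := j))]
    have h2 : (2:Nat)^(k+1-j) = 2 * 2^(k-j) := by rw [← pow_succ']; congr 1; omega
    have h3 : (2:Nat)^(k-j) = 2 * 2^(k-j-1) := by rw [← pow_succ']; congr 1; omega
    simp [h2, h3]
  · subst hj
    have e1 : 2^(j+1)*t = 2^j * (2*t) := by ring
    have e3 : 2^j * (2*t) + 2^j = 2^j*(2*t+1) := by ring
    rw [Nat.testBit_eq_decide_div_mod_eq, Nat.testBit_eq_decide_div_mod_eq, Nat.testBit_eq_decide_div_mod_eq,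
        e1, e3, Nat.mul_div_cancel_left _ (Nat.pow_pos (by norm_num) (n := j)),
        Nat.mul_div_cancel_left _ (Nat.pow_pos (by norm_num) (n := j)),
        Nat.div_self (Nat.pow_pos (by norm_num) (n := j))]
    simp
  · have e0 : j = (j - (k+1)) + (k+1) := by omega
    have hlt : (2:Nat)^k < 2^(k+1) := Nat.pow_lt_pow_right (by norm_num) (by omega)
    have e1 : (2^(k+1)*t + 2^k) / 2^(k+1) = t := by
      rw [Nat.add_comm, Nat.add_mul_div_left _ _ (Nat.pow_pos (by norm_num) (n := k+1)),
          Nat.div_eq_of_lt hlt]; omega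
    have e2 : (2^(k+1)*t) / 2^(k+1) = t := Nat.mul_div_cancel_left _ (Nat.pow_pos (by norm_num) (n := k+1))
    rw [e0, Nat.testBit_add, Nat.testBit_add, Nat.testBit_add, e1, e2,
        Nat.div_eq_of_lt hlt]
    simp [Nat.zero_testBit]

theorem Msum_dvd (N : Int) (j : Nat) : 2 ^ j ∣ Msum N j := by
  induction j using Msum.induct with
  | case1 j h => rw [Msum, if_pos h]; exact dvd_zero _
  | case2 j h ih =>
    rw [Msum, if_neg h]
    rcases ih with ⟨t, ht⟩
    refine ⟨(if keptB N j then 1 else 0) + 2 * t, ?_⟩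
    rw [ht, pow_succ]
    split_ifs <;> ring

theorem band_one_cast (a : Nat) : PySem.Int.band ((a : Nat) : Int) 1 = ((a % 2 : Nat) : Int) := by
  have := PySem.Int.band_natCast a 1
  simpa [Nat.and_one_is_mod] using this

theorem Msum_read (N : Int) (j : Nat) (hj : j ≤ 29) :
    PySem.Int.band (((Msum N j : Nat) : Int) >>> j) 1 = if keptB N j then 1 else 0 := by
  obtain ⟨t, ht⟩ := Msum_dvd N (j + 1)
  have hu : Msum N j = 2 ^ j * ((if keptB N j then 1 else 0) + 2 * t) := by
    rw [Msum, if_neg (by omega), ht, pow_succ]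
    split_ifs <;> ring
  rw [show (((Msum N j : Nat) : Int) >>> j) = ((Msum N j >>> j : Nat) : Int) from rfl,
      band_one_cast, Nat.shiftRight_eq_div_pow, hu,
      Nat.mul_div_cancel_left _ (Nat.pow_pos (by norm_num) (n := j))]
  split_ifs <;> simp [Nat.add_mul_mod_self_left]

theorem keptB_ext (N : Int) (j : Nat) (hj : j ≤ 29) :
    keptB N j = ((!(PySem.Int.band (N >>> j) 1 == 0)) && !(keptB N (j + 1))) := by
  rw [keptB, if_neg (by omega)]

theorem keptB_30 (N : Int) : keptB N 30 = false := by rw [keptB]; simp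

theorem Msum_skip (N : Int) (j : Nat) (hj : j ≤ 29) (hk : keptB N j = false) :
    Msum N j = Msum N (j + 1) := by
  rw [Msum, if_neg (by omega), hk]; simp

theorem Msum_keep (N : Int) (j : Nat) (hj : j ≤ 29) (hk : keptB N j = true) :
    Msum N j = 2 ^ j + Msum N (j + 1) := by
  rw [Msum, if_neg (by omega), hk]; simp

theorem bor_pow_cast (m : Nat) (j : Nat) (h : 2 ^ (j + 1) ∣ m) :
    PySem.Int.bor ((m : Nat) : Int) ((1:Int) <<< j) = (((m + 2 ^ j : Nat)) : Int) := by
  have e1 : ((1:Int) <<< j) = (((1 <<< j : Nat) : Nat) : Int) := rfl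
  rw [e1, PySem.Int.bor_natCast m (1 <<< j), Nat.one_shiftLeft, lorPowAdd m j h]

theorem stepA (N : Int) (j : Nat) (hj : j ≤ 29) :
    solutionStep N ((Msum N (j + 1) : Nat) : Int) (j : Int) = ((Msum N j : Nat) : Int) := by
  have htn : ((j : Int)).toNat = j := Int.toNat_natCast j
  have htn1 : ((j : Int) + 1).toNat = j + 1 := by omega
  simp only [solutionStep, htn, htn1]
  by_cases hb : PySem.Int.band (N >>> j) 1 ≠ 0
  · rw [if_pos hb]
    have hbeq : (PySem.Int.band (N >>> j) 1 == 0) = false := beq_eq_false_iff_ne.mpr hb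
    by_cases hj29 : j = 29
    · subst hj29
      have hd : (decide (((29:Nat) : Int) < 29)) = false := by norm_num
      simp only [hd, Bool.false_and, Bool.not_false]
      rw [if_pos trivial]
      have hk : keptB N 29 = true := by
        rw [keptB_ext N 29 (by omega), keptB_30, hbeq]; rfl
      rw [bor_pow_cast _ _ (Msum_dvd N 30), Msum_keep N 29 (by omega) hk]
      norm_num [Nat.add_comm]
    · have hd : ((j : Int) < 29) := by omega
      simp only [hd, decide_true, Bool.true_and]
      rw [Msum_read N (j + 1) (by omega)]
      by_cases hk1 : keptB N (j + 1) = true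
      · have h10 : ((if keptB N (j+1) then (1:Int) else 0) == 0) = false := by rw [hk1]; rfl
        rw [h10]
        norm_num
        have hk : keptB N j = false := by
          rw [keptB_ext N j hj, hk1]; simp
        rw [Msum_skip N j hj hk]
      · have hk1f : keptB N (j+1) = false := by
          cases hhh : keptB N (j+1) with
          | false => rfl
          | true => exact absurd hhh hk1
        have h10 : ((if keptB N (j+1) then (1:Int) else 0) == 0) = true := by rw [hk1f]; rfl
        rw [h10]
        norm_num
        have hk : keptB N j = true := by
          rw [keptB_ext N j hj, hk1f, hbeq]; rfl
        rw [bor_pow_cast _ _ (Msum_dvd N (j + 1)), Msum_keep N j hj hk, Nat.add_comm]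
  · rw [if_neg hb]
    have hk : keptB N j = false := by
      rw [keptB_ext N j hj]
      simp only [ne_eq, not_not] at hb
      simp [hb]
    rw [Msum_skip N j hj hk]

theorem foldA (N : Int) (j : Nat) (hj : j ≤ 30) :
    (List.map (fun n : Nat => (n : Int)) (List.range j).reverse).foldl (solutionStep N)
      ((Msum N j : Nat) : Int) = ((Msum N 0 : Nat) : Int) := by
  induction j with
  | zero => simp
  | succ j ih =>
    rw [List.range_succ, List.reverse_append, List.reverse_singleton, List.singleton_append]
    simp only [List.map_cons, List.foldl_cons]
    rw [stepA N j (by omega)]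
    exact ih (by omega)

theorem solutionA (N : Int) (h : is_sparse N = false) :
    solution N = ((Msum N 0 : Nat) : Int) := by
  rw [solution, h, if_neg (by simp),
      show PySem.List.pyRange 29 (-1) (-1) = List.map (fun n : Nat => (n : Int)) (List.range 30).reverse by decide,
      show (0 : Int) = ((Msum N 30 : Nat) : Int) by rw [Msum]; simp]
  exact foldA N 30 (by omega)

-- ===== B side =====

theorem rb_ge (N : Int) (i : Int) (h : -1 ≤ i) : -1 ≤ runBottom N i := by
  induction i using runBottom.induct (N := N) with
  | case1 i h1 ih => rw [runBottom, if_pos h1]; exact ih (by omega)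
  | case2 i h1 => rw [runBottom, if_neg h1]; omega

theorem rb_bits (N : Int) (i : Int) :
    ∀ l : Int, runBottom N i < l → l ≤ i → PySem.Int.band (N >>> l.toNat) 1 ≠ 0 := by
  induction i using runBottom.induct (N := N) with
  | case1 i h1 ih =>
    intro l hl1 hl2
    rw [runBottom, if_pos h1] at hl1
    rcases eq_or_lt_of_le hl2 with rfl | hlt
    · exact h1.2
    · exact ih l hl1 (by omega)
  | case2 i h1 =>
    intro l hl1 hl2
    rw [runBottom, if_neg h1] at hl1
    omega

theorem rb_stop (N : Int) (i : Int) (h : 0 ≤ runBottom N i) :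
    PySem.Int.band (N >>> (runBottom N i).toNat) 1 = 0 := by
  induction i using runBottom.induct (N := N) with
  | case1 i h1 ih => rw [runBottom, if_pos h1] at h ⊢; exact ih h
  | case2 i h1 =>
    rw [runBottom, if_neg h1] at h ⊢
    by_contra hc
    exact h1 ⟨h, hc⟩

theorem findRuns_acc (N : Int) : ∀ (n : Nat) (i : Int) (acc : List (Int × Int)),
    (i + 1).toNat ≤ n → findRuns N i acc = acc ++ findRuns N i [] := by
  intro n
  induction n with
  | zero =>
    intro i acc h
    have h0 : ¬ 0 ≤ i := by omega
    rw [findRuns, dif_neg h0, findRuns, dif_neg h0, List.append_nil]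
  | succ n ih =>
    intro i acc h
    by_cases h0 : 0 ≤ i
    · by_cases hb : PySem.Int.band (N >>> i.toNat) 1 ≠ 0
      · have hrb : (runBottom N i + 1).toNat ≤ n := by
          have h1 : runBottom N i = runBottom N (i - 1) := by
            rw [runBottom, if_pos ⟨h0, hb⟩]
          have h2 := runBottom_le N (i - 1)
          omega
        rw [findRuns, dif_pos h0, if_pos hb, ih _ _ hrb]
        conv_rhs => rw [findRuns, dif_pos h0, if_pos hb, ih _ _ hrb]
        simp
      · rw [findRuns, dif_pos h0, if_neg hb]
        conv_rhs => rw [findRuns, dif_pos h0, if_neg hb]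
        exact ih _ _ (by omega)
    · rw [findRuns, dif_neg h0]
      conv_rhs => rw [findRuns, dif_neg h0]
      simp

theorem keptRun (N : Int) (p b : Nat) (hp : p ≤ 29) (hb : b ≤ p)
    (hfresh : keptB N (p + 1) = false)
    (hbits : ∀ l : Nat, b ≤ l → l ≤ p → PySem.Int.band (N >>> l) 1 ≠ 0) :
    ∀ d : Nat, d ≤ p - b → keptB N (p - d) = decide (d % 2 = 0) := by
  intro d
  induction d with
  | zero =>
    intro _
    rw [Nat.sub_zero, keptB_ext N p hp, hfresh,
        beq_eq_false_iff_ne.mpr (hbits p hb (by omega))]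
    rfl
  | succ d ihd =>
    intro hd
    have hband := beq_eq_false_iff_ne.mpr (hbits (p - (d+1)) (by omega) (by omega))
    rw [keptB_ext N (p - (d+1)) (by omega), show p - (d+1) + 1 = p - d by omega,
        ihd (by omega), hband]
    by_cases h2 : d % 2 = 0
    · have h3 : ¬ ((d+1) % 2 = 0) := by omega
      simp [h2, h3]
    · have h3 : (d+1) % 2 = 0 := by omega
      simp [h2, h3]

theorem innerIG (N : Int) : ∀ (n : Nat) (i : Int), 1 ≤ n → 0 ≤ i → i.toNat ≤ 29 →
    2 * (n - 1) ≤ i.toNat →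
    (∀ t : Nat, t < n → keptB N (i.toNat - 2 * t) = true) →
    (∀ t : Nat, t + 1 < n → keptB N (i.toNat - (2 * t + 1)) = false) →
    (List.range n).foldl
        (fun (P : Int) (t : Nat) => PySem.Int.bor P ((1:Int) <<< ((i - 2 * (t : Int)).toNat)))
        ((Msum N (i.toNat + 1) : Nat) : Int)
      = ((Msum N (i.toNat - 2 * (n - 1)) : Nat) : Int) := by
  intro n
  induction n with
  | zero => intro i h1; omega
  | succ n ih =>
    intro i _ h0 h29 hbound hk hodd
    rcases Nat.eq_zero_or_pos n with rfl | hn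
    · rw [List.range_one, List.foldl_cons, List.foldl_nil]
      have e0 : (i - 2 * ((0:Nat) : Int)).toNat = i.toNat := by omega
      rw [e0, bor_pow_cast _ _ (Msum_dvd N (i.toNat + 1)),
          Nat.add_comm, ← Msum_keep N i.toNat h29 (hk 0 (by omega))]
      norm_num
    · rw [List.range_succ_eq_map, List.foldl_cons, List.foldl_map]
      have e0 : (i - 2 * ((0:Nat) : Int)).toNat = i.toNat := by omega
      rw [e0, bor_pow_cast _ _ (Msum_dvd N (i.toNat + 1)), Nat.add_comm,
          ← Msum_keep N i.toNat h29 (hk 0 (by omega))]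
      have efun : (fun (P : Int) (t : Nat) =>
            PySem.Int.bor P ((1:Int) <<< ((i - 2 * ((Nat.succ t : Nat) : Int)).toNat)))
          = (fun (P : Int) (t : Nat) =>
            PySem.Int.bor P ((1:Int) <<< (((i - 2) - 2 * ((t : Nat) : Int)).toNat))) := by
        funext P t
        congr 2
        push_cast
        ring_nf
      rw [efun]
      have hstate : ((Msum N i.toNat : Nat) : Int)
          = ((Msum N ((i - 2).toNat + 1) : Nat) : Int) := by
        have e1 : (i - 2).toNat + 1 = i.toNat - 1 := by omega
        rw [e1, Msum_skip N (i.toNat - 1) (by omega) ?_ ,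
            show i.toNat - 1 + 1 = i.toNat by omega]
        have := hodd 0 (by omega)
        simpa using this
      rw [hstate, ih (i - 2) (by omega) (by omega) (by omega) (by omega) ?hk ?hodd]
      · congr 2
        omega
      case hk =>
        intro t ht
        have := hk (t + 1) (by omega)
        rwa [show i.toNat - 2 * (t + 1) = (i - 2).toNat - 2 * t by omega] at this
      case hodd =>
        intro t ht
        have := hodd (t + 1) (by omega)
        rwa [show i.toNat - (2 * (t + 1) + 1) = (i - 2).toNat - (2 * t + 1) by omega] at this

theorem runStep (N : Int) (i : Int) (h0 : 0 ≤ i) (h29 : i ≤ 29)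
    (hb : PySem.Int.band (N >>> i.toNat) 1 ≠ 0)
    (hfresh : keptB N (i.toNat + 1) = false) :
    runOr ((Msum N (i.toNat + 1) : Nat) : Int) (i, i - runBottom N i)
      = ((Msum N ((runBottom N i + 1).toNat) : Nat) : Int) := by
  have hj1 : runBottom N i ≤ i - 1 := by
    rw [runBottom, if_pos ⟨h0, hb⟩]; exact runBottom_le N (i - 1)
  have hjm : -1 ≤ runBottom N i := rb_ge N i (by omega)
  set j := runBottom N i with hjdef
  set p := i.toNat with hpdef
  set b := (j + 1).toNat with hbdef
  have hbp : b ≤ p := by omega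
  have hbits : ∀ l : Nat, b ≤ l → l ≤ p → PySem.Int.band (N >>> l) 1 ≠ 0 := by
    intro l hl1 hl2
    have := rb_bits N i (l : Int) (by omega) (by omega)
    rwa [Int.toNat_natCast] at this
  have hkr := keptRun N p b (by omega) hbp hfresh hbits
  have hLpos : (0:Int) < i - j := by omega
  rw [runOr, PySem.List.pyRange_of_pos _ _ (by norm_num : (0:Int) < 2), if_pos (by omega), List.foldl_map]
  set n := ((i - j - 0 + 2 - 1) / 2).toNat with hndef
  have hn2 : 2 * ((n:Int) - 1) < i - j ∧ i - j ≤ 2 * (n:Int) := by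
    constructor <;> omega
  have hnn : 1 ≤ n := by omega
  have efun : (fun (P : Int) (k : Nat) =>
        PySem.Int.bor P ((1:Int) <<< ((i, i - j).1 - ((0:Int) + 2 * (k:Int))).toNat))
      = (fun (P : Int) (t : Nat) =>
        PySem.Int.bor P ((1:Int) <<< ((i - 2 * (t : Int)).toNat))) := by
    funext P t
    norm_num
  rw [efun, innerIG N n i hnn h0 (by omega) (by omega) ?hk ?hodd]
  case hk =>
    intro t ht
    rw [hkr (2 * t) (by omega)]
    simp
  case hodd =>
    intro t ht
    rw [hkr (2 * t + 1) (by omega)]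
    simp [Nat.add_mod]
  -- now identify Msum (p - 2*(n-1)) with Msum b
  by_cases hpar : (p - b) % 2 = 0
  · have : p - 2 * (n - 1) = b := by omega
    rw [this]
  · have hq : p - 2 * (n - 1) = b + 1 := by omega
    have hkb : keptB N b = false := by
      have := hkr (p - b) (by omega)
      rw [show p - (p - b) = b by omega] at this
      simp [hpar] at this
      exact this
    rw [hq, ← Msum_skip N b (by omega) hkb]

theorem outFold (N : Int) : ∀ (n : Nat) (i : Int), (i + 1).toNat ≤ n → -1 ≤ i → i ≤ 29 →
    (keptB N (i + 1).toNat = false ∨ ¬(0 ≤ i ∧ PySem.Int.band (N >>> i.toNat) 1 ≠ 0)) →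
    (findRuns N i []).foldl runOr ((Msum N (i + 1).toNat : Nat) : Int)
      = ((Msum N 0 : Nat) : Int) := by
  intro n
  induction n with
  | zero =>
    intro i h hm h29 _
    have hi : i = -1 := by omega
    subst hi
    rw [findRuns, dif_neg (by omega)]
    norm_num
  | succ n ih =>
    intro i hn hm h29 hfresh
    by_cases h0 : 0 ≤ i
    · by_cases hb : PySem.Int.band (N >>> i.toNat) 1 ≠ 0
      · have hfr : keptB N (i.toNat + 1) = false := by
          rcases hfresh with h | h
          · rwa [show (i + 1).toNat = i.toNat + 1 by omega] at h
          · exact absurd ⟨h0, hb⟩ h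
        have hj1 : runBottom N i ≤ i - 1 := by
          rw [runBottom, if_pos ⟨h0, hb⟩]; exact runBottom_le N (i - 1)
        have hjm : -1 ≤ runBottom N i := rb_ge N i (by omega)
        rw [findRuns, dif_pos h0, if_pos hb,
            findRuns_acc N n (runBottom N i) _ (by omega),
            List.nil_append, List.singleton_append, List.foldl_cons,
            show (i + 1).toNat = i.toNat + 1 by omega,
            runStep N i h0 (by omega) hb hfr]
        apply ih (runBottom N i) (by omega) hjm (by omega)
        rcases Int.lt_or_le (runBottom N i) 0 with hneg | hpos
        · right; omega
        · right
          intro hcon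
          exact hcon.2 (rb_stop N i hpos)
      · have hki : keptB N i.toNat = false := by
          rw [keptB_ext N i.toNat (by omega)]
          simp only [ne_eq, not_not] at hb
          simp [hb]
        rw [findRuns, dif_pos h0, if_neg hb]
        have hstate : ((Msum N (i + 1).toNat : Nat) : Int)
            = ((Msum N ((i - 1) + 1).toNat : Nat) : Int) := by
          rw [show (i + 1).toNat = i.toNat + 1 by omega,
              show ((i - 1) + 1).toNat = i.toNat by omega,
              Msum_skip N i.toNat (by omega) hki]
        rw [hstate]
        exact ih (i - 1) (by omega) (by omega) (by omega)
          (Or.inl (by rwa [show (i - 1 + 1).toNat = i.toNat by omega]))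
    · have hi : i = -1 := by omega
      subst hi
      rw [findRuns, dif_neg h0]
      norm_num

theorem solutionB (N : Int) (h : is_sparse N = false) :
    solution_alt N = ((Msum N 0 : Nat) : Int) := by
  rw [solution_alt, h, if_neg (by simp),
      show (0 : Int) = ((Msum N (29 + 1 : Int).toNat : Nat) : Int) by rw [Msum]; simp]
  exact outFold N 31 29 (by norm_num) (by norm_num) (by norm_num)
    (Or.inl (by rw [show ((29:Int) + 1).toNat = 30 from rfl, keptB_30]))

-- ===== VERDICT (by name: the statement is the Claim_ definition above) =====
theorem solution_spec : Claim_equal_solution := by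
  intro N _
  unfold Spec_solution
  by_cases hs : is_sparse N = true
  · rw [solution, if_pos hs, solution_alt, if_pos hs]
  · have hsf : is_sparse N = false := by simpa using hs
    rw [solutionA N hsf, solutionB N hsf]
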